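-- pv_equiv track=rewrite | github.com/broadinstitute/gnomad_qc | gnomad_qc/v3/create_release/prepare_data_release.py | make_label_combos
-- ===== SOURCE A (Python) =====
-- import copy
-- import itertools
-- from typing import Dict, List, Optional
--
-- SORT_ORDER = ['popmax', 'group', 'pop', 'subpop', 'sex']
--
-- def make_label_combos(label_groups: Dict[str, List[str]]) -> List[str]:
--     '''
--     Make combinations of all possible labels for a supplied dictionary of label groups
--     :param dict label_groups: Dictionary containing an entry for each label group, where key is the name of the grouping,
--         e.g. "sex" or "pop", and value is a list of all possible values for that grouping (e.g. ["male", "female"] or ["afr", "nfe", "amr"])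
--     :return: list of all possible combinations of values for the supplied label groupings
--     :rtype: list[str]
--     '''
--     copy_label_groups = copy.deepcopy(label_groups)
--     if len(copy_label_groups) == 1:
--         return [item for sublist in copy_label_groups.values() for item in sublist]
--     anchor_group = sorted(copy_label_groups.keys(), key=lambda x: SORT_ORDER.index(x))[0]
--     anchor_val = copy_label_groups.pop(anchor_group)
--     combos = []
--     for x,y in itertools.product(anchor_val, make_label_combos(copy_label_groups)):
--         combos.append('{0}_{1}'.format(x,y))
--     return combos
-- ===== SOURCE B (Python) =====
-- import itertools
--
-- SORT_ORDER = ['popmax', 'group', 'pop', 'subpop', 'sex']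
--
-- def make_label_combos(label_groups):
--     keys = list(label_groups)
--     if len(keys) > 1:
--         keys.sort(key=SORT_ORDER.index)
--     return ['_'.join(combo)
--             for combo in itertools.product(*(label_groups[k] for k in keys))]
-- ===== Notes on version B (the rewrite author's own statement) =====
-- stated objective: simpler
-- what changed: Replaces A's recursion (deep copy, re-sort and dict-pop at every level) with one sort of the keys followed by a single flat itertools.product joined with '_'.
-- outside the precondition, e.g. on make_label_combos({}): A raises IndexError, B returns ['']
import Mathlib
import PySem

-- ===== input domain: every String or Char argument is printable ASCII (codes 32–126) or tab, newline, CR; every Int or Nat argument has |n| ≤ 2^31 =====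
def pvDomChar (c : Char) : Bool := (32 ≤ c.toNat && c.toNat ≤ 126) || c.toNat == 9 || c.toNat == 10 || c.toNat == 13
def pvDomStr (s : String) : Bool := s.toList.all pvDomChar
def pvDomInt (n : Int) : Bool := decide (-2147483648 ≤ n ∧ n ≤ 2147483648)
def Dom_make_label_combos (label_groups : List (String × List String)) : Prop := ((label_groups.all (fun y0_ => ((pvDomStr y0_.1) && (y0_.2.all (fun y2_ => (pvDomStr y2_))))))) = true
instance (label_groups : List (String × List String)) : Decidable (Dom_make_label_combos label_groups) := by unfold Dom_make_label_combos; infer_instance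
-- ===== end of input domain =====

-- B replaces A's recursion (deep copy, re-sort and dict-pop per level) with one key sort and a single flat product joined with '_' (simpler decomposition).


-- ===== PORT A =====
def SORT_ORDER : List String := ["popmax", "group", "pop", "subpop", "sex"]

-- SORT_ORDER.index(x); Python raises ValueError when x is absent (Pre_ keeps such keys out of the sort)
def pvKey (x : String) : Nat := (PySem.List.index? SORT_ORDER x).getD 0

-- the recursion of A; fuel = number of groups (Python's recursion pops one group per level)
def pvGoA : Nat → PySem.Dict String (List String) → List String
  | 0, _ => []
  | fuel + 1, d =>
    if d.size == 1 then
      (d.values).flatten   -- [item for sublist in values for item in sublist]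
    else
      match PySem.List.sorted d.keys pvKey with
      | [] => []           -- Python: IndexError on [0] (empty dict; outside Pre_)
      | anchor :: _ =>
        match PySem.Dict.pop? d anchor with
        | none => []       -- unreachable: anchor is a key of d
        | some (anchor_val, rest) =>
          -- for x, y in itertools.product(anchor_val, make_label_combos(rest)): combos.append('{0}_{1}'.format(x, y))
          (anchor_val.flatMap (fun x => (pvGoA fuel rest).map (fun y => (x, y)))).foldl
            (fun combos p => combos ++ [p.1 ++ "_" ++ p.2]) []

def make_label_combos (label_groups : List (String × List String)) : List String :=
  pvGoA label_groups.length (PySem.Dict.mk label_groups)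

-- ===== PORT B =====
-- itertools.product over a list of value lists, tuples as lists
def pyProduct : List (List String) → List (List String)
  | [] => [[]]
  | l :: ls => l.flatMap (fun x => (pyProduct ls).map (x :: ·))

-- keys = list(label_groups); if len(keys) > 1: keys.sort(key=SORT_ORDER.index)
def pvSortedKeys (label_groups : List (String × List String)) : List String :=
  if 1 < (label_groups.map Prod.fst).length then
    PySem.List.sorted (label_groups.map Prod.fst) pvKey
  else
    label_groups.map Prod.fst

def make_label_combos_alt (label_groups : List (String × List String)) : List String :=
  (pyProduct ((pvSortedKeys label_groups).map
      (fun k => PySem.Dict.getD (PySem.Dict.mk label_groups) k []))).map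
    (fun combo => PySem.Str.join "_" combo)

-- ===== PRECONDITION & SPEC =====
-- Pre_: the dict is nonempty (on the empty dict A's sorted(...)[0] raises IndexError), keys are
-- distinct (the assoc list stands for a Python dict), and unless there is exactly one group every
-- key must belong to SORT_ORDER (otherwise SORT_ORDER.index raises ValueError).
def Pre_make_label_combos (label_groups : List (String × List String)) : Prop :=
  label_groups ≠ [] ∧ (label_groups.map Prod.fst).Nodup ∧
    (label_groups.length = 1 ∨ ∀ k ∈ label_groups.map Prod.fst, k ∈ SORT_ORDER)
instance (label_groups : List (String × List String)) : Decidable (Pre_make_label_combos label_groups) := by unfold Pre_make_label_combos; infer_instance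

def pvWitness_make_label_combos : (List (String × List String)) :=
  [("pop", ["afr", "nfe"]), ("sex", ["m", "f"])]

def Spec_make_label_combos (label_groups : List (String × List String)) (out : List String) : Prop := out = make_label_combos_alt label_groups
instance (label_groups : List (String × List String)) (out : List String) : Decidable (Spec_make_label_combos label_groups out) := by unfold Spec_make_label_combos; infer_instance

-- ===== CLAIM (what is proved, stated in full; the proofs are below) =====
def Claim_equal_make_label_combos : Prop := ∀ (label_groups : List (String × List String)), Dom_make_label_combos label_groups → Pre_make_label_combos label_groups → Spec_make_label_combos label_groups (make_label_combos label_groups)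

-- ===== LEMMAS AND PROOFS =====

theorem pvKey_inj : ∀ a ∈ SORT_ORDER, ∀ b ∈ SORT_ORDER, pvKey a = pvKey b → a = b := by decide

theorem str_join_singleton (x : String) : PySem.Str.join "_" [x] = x := by
  simp [PySem.Str.join, PySem.Chars.join_singleton, String.ofList_toList]

theorem str_join_cons (x : String) (c : List String) (h : c ≠ []) :
    PySem.Str.join "_" (x :: c) = x ++ "_" ++ PySem.Str.join "_" c := by
  obtain ⟨q, rest, rfl⟩ := List.exists_cons_of_ne_nil h
  apply String.toList_inj.mp
  simp [PySem.Str.join, PySem.Chars.join_cons_cons, String.toList_ofList]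

theorem length_of_mem_pyProduct : ∀ (ls : List (List String)) (c : List String),
    c ∈ pyProduct ls → c.length = ls.length := by
  intro ls
  induction ls with
  | nil => intro c hc; simp [pyProduct] at hc; simp [hc]
  | cons l ls ih =>
    intro c hc
    simp [pyProduct] at hc
    obtain ⟨x, _, c', hc', rfl⟩ := hc
    simp [ih c' hc']

theorem find?_filter_ne (l : List (String × List String)) (a k : String) (h : k ≠ a) :
    (l.filter (fun p => !(p.1 == a))).find? (fun p => p.1 == k) = l.find? (fun p => p.1 == k) := by
  induction l with
  | nil => rfl
  | cons p l ih =>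
    by_cases hp : p.1 = k
    · simp [hp, h]
    · by_cases hpa : p.1 = a <;> simp [hp, hpa, ih, Ne.symm h]

theorem get?_erase_of_ne (d : PySem.Dict String (List String)) (a k : String) (h : k ≠ a) :
    (d.erase a).get? k = d.get? k := by
  simp [PySem.Dict.erase, PySem.Dict.get?, find?_filter_ne d.items a k h]

theorem map_join_flatMap_singleton (v : List String) :
    (v.flatMap (fun x => [[x]])).map (fun c => PySem.Str.join "_" c) = v := by
  induction v with
  | nil => rfl
  | cons x v ih =>
    simp only [List.flatMap_cons, List.map_cons, ih, str_join_singleton,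
      List.singleton_append]

theorem main_lemma : ∀ (n : Nat) (d : PySem.Dict String (List String)),
    d.items.length ≤ n → d.items ≠ [] → d.keys.Nodup →
    (d.items.length = 1 ∨ ∀ k ∈ d.keys, k ∈ SORT_ORDER) →
    pvGoA n d =
      (pyProduct ((PySem.List.sorted d.keys pvKey).map (fun k => d.getD k []))).map
        (fun combo => PySem.Str.join "_" combo) := by
  intro n
  induction n with
  | zero =>
    intro d hle hne _ _
    exact absurd (List.eq_nil_of_length_eq_zero (Nat.le_zero.mp hle)) hne
  | succ n ih =>
    intro d hle hne hnd hso
    have hpos : 0 < d.items.length := List.length_pos_of_ne_nil hne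
    by_cases h1 : d.items.length = 1
    · obtain ⟨⟨k, v⟩, hd⟩ := List.length_eq_one_iff.mp h1
      have hkeys : d.keys = [k] := by simp [PySem.Dict.keys, hd]
      have hsorted : PySem.List.sorted d.keys pvKey = [k] := by
        rw [hkeys]; exact PySem.List.sorted_eq_self_of_pairwise _ _ (by simp)
      have hget : d.getD k [] = v := by
        simp [PySem.Dict.getD, PySem.Dict.get?, hd]
      calc pvGoA (n + 1) d = v := by
            simp [pvGoA, PySem.Dict.size, PySem.Dict.values, hd]
        _ = _ := by
            rw [hsorted, List.map_cons, List.map_nil, hget,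
              show pyProduct [v] = v.flatMap (fun x => [[x]]) from by simp [pyProduct]]
            exact (map_join_flatMap_singleton v).symm
    · have hso' : ∀ k ∈ d.keys, k ∈ SORT_ORDER := hso.resolve_left h1
      have hlen2 : 2 ≤ d.items.length := by omega
      have hkl : d.keys.length = d.items.length := by simp [PySem.Dict.keys]
      cases heq : PySem.List.sorted d.keys pvKey with
      | nil =>
        exfalso
        have := (PySem.List.sorted_eq_nil_iff d.keys pvKey false).mp heq
        rw [this] at hkl; simp at hkl; omega
      | cons anchor restS =>
      have hperm : (anchor :: restS).Perm d.keys := heq ▸ PySem.List.sorted_perm d.keys pvKey false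
      have hmem : anchor ∈ d.keys := hperm.mem_iff.mp (List.mem_cons_self)
      have hndS : (anchor :: restS).Nodup := hperm.nodup_iff.mpr hnd
      obtain ⟨v, hv⟩ : ∃ v, d.get? anchor = some v := by
        rcases hg : d.get? anchor with _ | v
        · exact absurd hmem ((PySem.Dict.get?_eq_none_iff_not_mem_keys d anchor).mp hg)
        · exact ⟨v, rfl⟩
      have hpop : PySem.Dict.pop? d anchor = some (v, d.erase anchor) := by
        simp [PySem.Dict.pop?, hv]
      have hrest_keys : (d.erase anchor).keys = d.keys.filter (fun k => !(k == anchor)) := by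
        simp [PySem.Dict.keys, PySem.Dict.erase, List.filter_map]
        rfl
      have herase : d.keys.filter (fun k => !(k == anchor)) = d.keys.erase anchor := by
        rw [List.Nodup.erase_eq_filter hnd anchor]
        rfl
      have hrest_len : (d.erase anchor).items.length = d.items.length - 1 := by
        have h1' : (d.erase anchor).items.length = (d.erase anchor).keys.length := by
          simp [PySem.Dict.keys]
        rw [h1', hrest_keys, herase, List.length_erase_of_mem hmem, hkl]
      have hstrict : (anchor :: restS).Pairwise (fun a b => pvKey a < pvKey b) := by
        have hle' : (anchor :: restS).Pairwise (fun a b => pvKey a ≤ pvKey b) :=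
          heq ▸ PySem.List.sorted_pairwise d.keys pvKey
        have hcomb := hndS.and hle'
        refine hcomb.imp_of_mem ?_
        intro a b ha hb ⟨hab, hleab⟩
        have haSO : a ∈ SORT_ORDER := hso' a (hperm.mem_iff.mp ha)
        have hbSO : b ∈ SORT_ORDER := hso' b (hperm.mem_iff.mp hb)
        exact lt_of_le_of_ne hleab (fun hk => hab (pvKey_inj a haSO b hbSO hk))
      have hpermTail : restS.Perm (d.keys.erase anchor) :=
        (List.cons_perm_iff_perm_erase.mp hperm).2
      have hsorted_rest : PySem.List.sorted (d.erase anchor).keys pvKey = restS := by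
        refine PySem.List.sorted_eq_of_perm_of_pairwise_lt _ _ _ ?_ (List.Pairwise.of_cons hstrict)
        rw [hrest_keys, herase]; exact hpermTail
      have hanchor_not : anchor ∉ restS := (List.nodup_cons.mp hndS).1
      have hagree : ∀ k ∈ restS, (d.erase anchor).getD k [] = d.getD k [] := by
        intro k hk
        have hkne : k ≠ anchor := fun h => hanchor_not (h ▸ hk)
        rw [PySem.Dict.getD_eq_get?_getD, PySem.Dict.getD_eq_get?_getD,
          get?_erase_of_ne d anchor k hkne]
      have hIH := ih (d.erase anchor) (by omega) (by
          intro h0; rw [h0] at hrest_len; simp at hrest_len; omega)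
        (by rw [hrest_keys]; exact hnd.filter _)
        (Or.inr (by
          intro k hk
          rw [hrest_keys] at hk
          exact hso' k (List.mem_of_mem_filter hk)))
      have hsize : (d.size == 1) = false := by
        simp [PySem.Dict.size, h1]
      rw [show pvGoA (n + 1) d =
          ((v.flatMap (fun x => (pvGoA n (d.erase anchor)).map (fun y => (x, y)))).foldl
            (fun combos p => combos ++ [p.1 ++ "_" ++ p.2]) []) by
        simp only [pvGoA, hsize, Bool.false_eq_true, if_false, heq, hpop]]
      rw [hIH, hsorted_rest, List.map_congr_left hagree]
      have hgetanchor : d.getD anchor [] = v := PySem.Dict.getD_of_get?_eq_some d [] hv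
      rw [List.map_cons, hgetanchor]
      have hrestS_ne : restS ≠ [] := by
        intro h0
        have := hperm.length_eq
        rw [h0] at this; simp at this; omega
      rw [PySem.List.foldl_append_singleton_eq_map]
      simp only [List.nil_append, List.map_flatMap, List.map_map, pyProduct]
      refine congrArg (fun f => List.flatMap f v) (funext fun x => ?_)
      apply List.map_congr_left
      intro c hc
      have hclen : c.length = (restS.map (fun k => d.getD k [])).length :=
        length_of_mem_pyProduct _ _ hc
      have hcne : c ≠ [] := by
        intro h0; rw [h0] at hclen; simp at hclen
        exact hrestS_ne (List.eq_nil_of_length_eq_zero hclen.symm)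
      simp only [Function.comp_apply]
      rw [str_join_cons x c hcne]

theorem keys_mk_eq (label_groups : List (String × List String)) :
    (PySem.Dict.mk label_groups).keys = label_groups.map Prod.fst := rfl

theorem sorted_keys_eq (label_groups : List (String × List String)) (hne : label_groups ≠ []) :
    PySem.List.sorted (label_groups.map Prod.fst) pvKey = pvSortedKeys label_groups := by
  unfold pvSortedKeys
  by_cases hl : 1 < (label_groups.map Prod.fst).length
  · rw [if_pos hl]
  · rw [if_neg hl]
    have hpos : 0 < label_groups.length := List.length_pos_of_ne_nil hne
    have h1 : (label_groups.map Prod.fst).length = 1 := by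
      simp at hl ⊢; omega
    obtain ⟨k, hk⟩ := List.length_eq_one_iff.mp h1
    rw [hk]
    exact PySem.List.sorted_eq_self_of_pairwise _ _ (by simp)

-- ===== VERDICT (by name: the statement is the Claim_ definition above) =====
theorem make_label_combos_spec : Claim_equal_make_label_combos := by
  unfold Claim_equal_make_label_combos
  intro lg _ hpre
  obtain ⟨hne, hnd, hso⟩ := hpre
  unfold Spec_make_label_combos make_label_combos make_label_combos_alt
  rw [main_lemma lg.length (PySem.Dict.mk lg) (le_refl _) hne
    (by rw [keys_mk_eq]; exact hnd)
    (by rw [keys_mk_eq]; exact hso),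
    keys_mk_eq, sorted_keys_eq lg hne]
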